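-- pv_equiv track=rewrite | github.com/JoSihun/ThisIsCodingTest | Part2_Chapter10/p300_10-3.py | solution
-- ===== SOURCE A (Python) =====
-- def find_parent(x, parent):
--     if parent[x] != x:
--         parent[x] = find_parent(parent[x], parent)
--     return parent[x]
--
-- def union_parent(a, b, parent):
--     a = find_parent(a, parent)
--     b = find_parent(b, parent)
--     if a < b:
--         parent[b] = a
--     else:
--         parent[a] = b
--
-- def solution(n, graph):
--     answer = 0
--     edges = []
--     parent = [i for i in range(n + 1)]
--
--     for a, b, cost in graph:
--         edges.append((cost, a, b))
--     edges.sort()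
--
--     max_edge = 0
--     for cost, a, b in edges:
--         if find_parent(a, parent) != find_parent(b, parent):
--             union_parent(a, b, parent)
--             answer += cost
--             max_edge = cost
--
--     return answer - max_edge
-- ===== SOURCE B (Python) =====
-- def solution(n, graph):
--     # Kruskal by component-relabelling: comp[v] is the label (= smallest vertex) of
--     # v's component; merging rewrites the larger label instead of union-find recursion.
--     comp = list(range(n + 1))
--     answer = 0
--     max_edge = 0
--     for cost, a, b in sorted((c, a, b) for a, b, c in graph):
--         ca, cb = comp[a], comp[b]
--         if ca != cb:
--             lo, hi = (ca, cb) if ca < cb else (cb, ca)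
--             comp = [lo if x == hi else x for x in comp]
--             answer += cost
--             max_edge = cost
--     return answer - max_edge
-- ===== Notes on version B (the rewrite author's own statement) =====
-- stated objective: simpler
-- what changed: Replaces the recursive union-find with path compression (and its two helper functions) by a single loop that keeps a flat component-label list and merges two components by rewriting the larger label, so B needs no recursion and no helpers.
import Mathlib
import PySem

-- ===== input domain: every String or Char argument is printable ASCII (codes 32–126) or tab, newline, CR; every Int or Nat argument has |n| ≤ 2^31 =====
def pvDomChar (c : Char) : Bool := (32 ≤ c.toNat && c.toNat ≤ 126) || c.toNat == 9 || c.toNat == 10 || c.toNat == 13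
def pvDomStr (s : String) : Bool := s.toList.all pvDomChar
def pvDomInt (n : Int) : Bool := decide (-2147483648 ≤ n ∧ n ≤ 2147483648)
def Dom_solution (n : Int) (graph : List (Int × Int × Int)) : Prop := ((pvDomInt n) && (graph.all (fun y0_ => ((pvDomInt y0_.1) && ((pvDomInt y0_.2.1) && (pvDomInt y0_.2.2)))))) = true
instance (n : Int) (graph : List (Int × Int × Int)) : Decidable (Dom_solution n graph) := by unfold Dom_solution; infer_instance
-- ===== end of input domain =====

-- B replaces A's recursive union-find with path compression (two helper functions)
-- by a flat component-label list merged by relabelling: simpler (no recursion,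
-- no helpers), same return value on every input A accepts.

-- Python's sorted()/.sort() on 3-tuples (lexicographic by (cost, a, b)), realised
-- as three stable single-key sorts (exact by stability of Python's sort). Both
-- Pythons sort the same tuples the same way, so both ports share this helper.
def lexSort (xs : List (Int × Int × Int)) : List (Int × Int × Int) :=
  PySem.List.sorted (PySem.List.sorted (PySem.List.sorted xs (fun e => e.2.2)) (fun e => e.2.1)) (fun e => e.1)

-- ===== PORT A =====
-- find_parent(x, parent): returns (root, updated parent). Python's recursion has
-- no fuel; every caller passes fuel = parent.length, which is always sufficient
-- (each recursive step strictly decreases the index; proved in find_spec below).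
def findParent : Nat → Int → List Int → Int × List Int
  | 0, x, parent => (PySem.List.pyGetD parent x 0, parent)
  | fuel+1, x, parent =>
    let px := PySem.List.pyGetD parent x 0
    if px ≠ x then
      let r := findParent fuel px parent
      let parent2 := PySem.List.pySetD r.2 x r.1
      (PySem.List.pyGetD parent2 x 0, parent2)
    else (px, parent)

-- union_parent(a, b, parent)
def unionParent (fuel : Nat) (a b : Int) (parent : List Int) : List Int :=
  let fa := findParent fuel a parent
  let fb := findParent fuel b fa.2
  if fa.1 < fb.1 then PySem.List.pySetD fb.2 fb.1 fa.1
  else PySem.List.pySetD fb.2 fa.1 fb.1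

-- body of A's 'for cost, a, b in edges' loop; state = (answer, max_edge, parent)
def stepA (st : Int × Int × List Int) (e : Int × Int × Int) : Int × Int × List Int :=
  let fa := findParent st.2.2.length e.2.1 st.2.2
  let fb := findParent fa.2.length e.2.2 fa.2
  if fa.1 ≠ fb.1 then (st.1 + e.1, e.1, unionParent fb.2.length e.2.1 e.2.2 fb.2)
  else (st.1, st.2.1, fb.2)

def solution (n : Int) (graph : List (Int × Int × Int)) : Int :=
  let parent := PySem.List.pyRange 0 (n+1) 1
  let edges := graph.foldl (fun acc e => acc ++ [(e.2.2, e.1, e.2.1)]) []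
  let fin := (lexSort edges).foldl stepA (0, 0, parent)
  fin.1 - fin.2.1

-- ===== PORT B =====
-- body of B's loop; state = (answer, max_edge, comp)
def stepB (st : Int × Int × List Int) (e : Int × Int × Int) : Int × Int × List Int :=
  let ca := PySem.List.pyGetD st.2.2 e.2.1 0
  let cb := PySem.List.pyGetD st.2.2 e.2.2 0
  if ca ≠ cb then
    let lo := if ca < cb then ca else cb
    let hi := if ca < cb then cb else ca
    (st.1 + e.1, e.1, st.2.2.map (fun x => if x = hi then lo else x))
  else st

def solution_alt (n : Int) (graph : List (Int × Int × Int)) : Int :=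
  let fin := (lexSort (graph.map (fun e => (e.2.2, e.1, e.2.1)))).foldl stepB
    (0, 0, PySem.List.pyRange 0 (n+1) 1)
  fin.1 - fin.2.1

-- ===== PRECONDITION & SPEC =====
-- Exactly the inputs on which Python A returns: every edge endpoint must be a
-- valid (possibly negative, Python-style) index into the length-(n+1) parent
-- list, i.e. lie in [-(n+1), n]; outside this A raises IndexError.
def Pre_solution (n : Int) (graph : List (Int × Int × Int)) : Prop :=
  ∀ e ∈ graph, (-(n+1) ≤ e.1 ∧ e.1 ≤ n) ∧ (-(n+1) ≤ e.2.1 ∧ e.2.1 ≤ n)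
instance (n : Int) (graph : List (Int × Int × Int)) : Decidable (Pre_solution n graph) := by
  unfold Pre_solution; infer_instance

def pvWitness_solution : Int × (List (Int × Int × Int)) := (3, [(0, 1, 5), (1, 2, 3), (2, 3, 7)])

def Spec_solution (n : Int) (graph : List (Int × Int × Int)) (out : Int) : Prop := out = solution_alt n graph
instance (n : Int) (graph : List (Int × Int × Int)) (out : Int) : Decidable (Spec_solution n graph out) := by unfold Spec_solution; infer_instance

-- ===== CLAIM (what is proved, stated in full; the proofs are below) =====
def Claim_equal_solution : Prop := ∀ (n : Int) (graph : List (Int × Int × Int)), Dom_solution n graph → Pre_solution n graph → Spec_solution n graph (solution n graph)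

-- ===== LEMMAS AND PROOFS =====

-- parent entries are valid indices that never increase: 0 ≤ p[i] ≤ i
def Good (p : List Int) : Prop :=
  ∀ i, i < p.length → 0 ≤ p.getD i 0 ∧ (p.getD i 0).toNat ≤ i

-- the root of i following parent pointers, with fuel (fuel ≥ i always suffices)
def rootF (p : List Int) : Nat → Nat → Nat
  | 0, i => i
  | f+1, i => if (p.getD i 0).toNat < i then rootF p f (p.getD i 0).toNat else i

def rootp (p : List Int) (i : Nat) : Nat := rootF p i i

-- the normalised Python index (what pyIdx? yields under InRange)
def ix (L : Nat) (x : Int) : Nat := if 0 ≤ x then x.toNat else L - (-x).toNat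

-- the simulation relation between A's and B's loop states:
-- B's label list reads off the union-find roots of A's parent list
def RelAB (st st' : Int × Int × List Int) : Prop :=
  st.1 = st'.1 ∧ st.2.1 = st'.2.1 ∧ st.2.2.length = st'.2.2.length ∧ Good st.2.2 ∧
  ∀ k, k < st.2.2.length → st'.2.2.getD k 0 = (rootp st.2.2 k : Int)

lemma rootF_fuel (p : List Int) : ∀ i f g, i ≤ f → i ≤ g → rootF p f i = rootF p g i := by
  intro i
  induction i using Nat.strong_induction_on with
  | _ i IH =>
    intro f g hf hg
    match f, g with
    | 0, 0 => rfl
    | 0, g+1 =>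
      interval_cases i
      simp [rootF]
    | f+1, 0 =>
      interval_cases i
      simp [rootF]
    | f+1, g+1 =>
      simp only [rootF]
      split
      · rename_i hj
        exact IH _ hj _ _ (by omega) (by omega)
      · rfl

lemma rootp_step (p : List Int) (i : Nat) :
    rootp p i = if (p.getD i 0).toNat < i then rootp p (p.getD i 0).toNat else i := by
  unfold rootp
  match i with
  | 0 => simp [rootF]
  | k+1 =>
    simp only [rootF]
    split
    · rename_i hj
      exact rootF_fuel p _ _ _ (by omega) le_rfl
    · rfl

lemma rootp_le (p : List Int) (i : Nat) : rootp p i ≤ i := by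
  induction i using Nat.strong_induction_on with
  | _ i IH =>
    rw [rootp_step]
    split
    · rename_i hj; exact le_trans (IH _ hj) (by omega)
    · exact le_rfl

lemma rootp_fix (p : List Int) (hg : Good p) : ∀ i, i < p.length →
    p.getD (rootp p i) 0 = (rootp p i : Int) := by
  intro i
  induction i using Nat.strong_induction_on with
  | _ i IH =>
    intro hi
    rw [rootp_step]
    split
    · rename_i hj; exact IH _ hj (by omega)
    · rename_i hj
      obtain ⟨h0, hle⟩ := hg i hi
      omega

lemma rootp_root (p : List Int) (hg : Good p) (i : Nat) (hi : i < p.length) :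
    rootp p (rootp p i) = rootp p i := by
  have hfix := rootp_fix p hg i hi
  rw [rootp_step p (rootp p i), hfix]
  simp

lemma getD_set_self (p : List Int) (t : Nat) (v : Int) (h : t < p.length) :
    (p.set t v).getD t 0 = v := by
  simp [List.getD_eq_getElem?_getD, h]

lemma getD_set_ne (p : List Int) (t k : Nat) (v : Int) (h : k ≠ t) :
    (p.set t v).getD k 0 = p.getD k 0 := by
  simp [List.getD_eq_getElem?_getD, (Ne.symm h : t ≠ k)]

lemma comp_set (p : List Int) (hg : Good p) (t : Nat) (ht : t < p.length) :
    Good (p.set t (rootp p t : Int)) ∧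
    ∀ k, rootp (p.set t (rootp p t : Int)) k = rootp p k := by
  set p' := p.set t (rootp p t : Int) with hp'
  constructor
  · intro i hi
    rw [List.length_set] at hi
    by_cases hit : i = t
    · subst hit
      rw [getD_set_self p i _ hi]
      exact ⟨by positivity, by simpa using rootp_le p i⟩
    · rw [getD_set_ne p t i _ hit]; exact hg i hi
  · intro k
    induction k using Nat.strong_induction_on with
    | _ k IH =>
      by_cases hkt : k = t
      · subst hkt
        have hself : p'.getD k 0 = (rootp p k : Int) := getD_set_self p k _ ht
        rw [rootp_step p' k, hself]
        have hle := rootp_le p k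
        by_cases hlt : rootp p k < k
        · simp only [Int.toNat_natCast, if_pos hlt]
          rw [IH _ hlt]
          exact rootp_root p hg k ht
        · have : rootp p k = k := by omega
          simp [this]
      · have hsame : p'.getD k 0 = p.getD k 0 := getD_set_ne p t k _ hkt
        rw [rootp_step p' k, hsame, rootp_step p k]
        split
        · rename_i hj; exact IH _ hj
        · rfl

lemma union_set (p : List Int) (hg : Good p) (t w : Nat) (ht : t < p.length) (hw : w < t)
    (hrt : p.getD t 0 = (t : Int)) (hrw : p.getD w 0 = (w : Int)) :
    Good (p.set t (w : Int)) ∧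
    ∀ k, rootp (p.set t (w : Int)) k = if rootp p k = t then w else rootp p k := by
  set p' := p.set t (w : Int) with hp'
  have hroott : rootp p t = t := by rw [rootp_step, hrt]; simp
  have hrootw : rootp p w = w := by rw [rootp_step, hrw]; simp
  constructor
  · intro i hi
    rw [List.length_set] at hi
    by_cases hit : i = t
    · subst hit
      rw [getD_set_self p i _ hi]
      exact ⟨by positivity, by omega⟩
    · rw [getD_set_ne p t i _ hit]; exact hg i hi
  · intro k
    induction k using Nat.strong_induction_on with
    | _ k IH =>
      by_cases hkt : k = t
      · subst hkt
        have hself : p'.getD k 0 = (w : Int) := getD_set_self p k _ ht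
        rw [rootp_step p' k, hself]
        simp only [Int.toNat_natCast, if_pos hw]
        rw [IH _ hw, hrootw, hroott]
        simp [Nat.ne_of_lt hw]
      · have hsame : p'.getD k 0 = p.getD k 0 := getD_set_ne p t k _ hkt
        rw [rootp_step p' k, hsame, rootp_step p k]
        split
        · rename_i hj; exact IH _ hj
        · simp

lemma ix_lt (L : Nat) (x : Int) (h : PySem.Raise.InRange L x) : ix L x < L := by
  obtain ⟨h1, h2⟩ := h
  unfold ix
  split <;> omega

lemma pyIdx_ix (L : Nat) (x : Int) (h : PySem.Raise.InRange L x) :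
    PySem.List.pyIdx? L x = some (ix L x) := by
  obtain ⟨h1, h2⟩ := h
  simp only [PySem.List.pyIdx?, ix]
  split
  · rfl
  · rfl

lemma pyGetD_ix (p : List Int) (x : Int) (h : PySem.Raise.InRange p.length x) :
    PySem.List.pyGetD p x 0 = p.getD (ix p.length x) 0 := by
  simp [PySem.List.pyGetD, PySem.List.pyGet?, pyIdx_ix _ _ h, List.getD_eq_getElem?_getD]

lemma pySetD_ix (p : List Int) (x : Int) (v : Int) (h : PySem.Raise.InRange p.length x) :
    PySem.List.pySetD p x v = p.set (ix p.length x) v := by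
  simp [PySem.List.pySetD, PySem.List.pySet?, pyIdx_ix _ _ h]

lemma find_spec : ∀ (f : Nat) (p : List Int) (x : Int), Good p → 0 ≤ x →
    x < (p.length : Int) → x.toNat ≤ f →
    (findParent f x p).1 = (rootp p x.toNat : Int) ∧
    (findParent f x p).2.length = p.length ∧ Good (findParent f x p).2 ∧
    ∀ k, rootp (findParent f x p).2 k = rootp p k := by
  intro f
  induction f with
  | zero =>
    intro p x hg hx0 hxL hxf
    have hx : x = 0 := by omega
    subst hx
    have hL : 0 < p.length := by exact_mod_cast hxL
    have hin : PySem.Raise.InRange p.length 0 := ⟨by omega, hxL⟩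
    have hget : PySem.List.pyGetD p 0 0 = p.getD 0 0 := by
      rw [pyGetD_ix p 0 hin]; simp [ix]
    obtain ⟨h0, hle⟩ := hg 0 hL
    have hval : p.getD 0 0 = 0 := by omega
    have hroot : rootp p 0 = 0 := by rw [rootp_step]; simp
    refine ⟨?_, rfl, hg, fun k => rfl⟩
    show PySem.List.pyGetD p 0 0 = _
    rw [hget, hval]
    simp [hroot]
  | succ f IH =>
    intro p x hg hx0 hxL hxf
    have hin : PySem.Raise.InRange p.length x := ⟨by omega, hxL⟩
    have hixx : ix p.length x = x.toNat := if_pos hx0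
    have hget : PySem.List.pyGetD p x 0 = p.getD x.toNat 0 := by
      rw [pyGetD_ix p x hin, hixx]
    have hxlen : x.toNat < p.length := by omega
    obtain ⟨h0, hle⟩ := hg x.toNat hxlen
    by_cases heq : PySem.List.pyGetD p x 0 = x
    · -- parent[x] == x: x is a root
      have hvx : p.getD x.toNat 0 = x := by rw [← hget, heq]
      have hroot : rootp p x.toNat = x.toNat := by
        rw [rootp_step, hvx]
        simp
      have hfp : findParent (f+1) x p = (x, p) := by
        simp only [findParent]
        rw [if_neg (not_not_intro heq), heq]
      rw [hfp]
      exact ⟨by simp [hroot]; omega, rfl, hg, fun k => rfl⟩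
    · -- recurse on parent[x]
      have hne : p.getD x.toNat 0 ≠ x := by rw [← hget]; exact heq
      have hjlt : (p.getD x.toNat 0).toNat < x.toNat := by omega
      obtain ⟨hr1, hrlen, hrg, hrroots⟩ :=
        IH p (PySem.List.pyGetD p x 0) hg (by rw [hget]; exact h0)
          (by rw [hget]; omega) (by rw [hget]; omega)
      have hrootix : rootp p (PySem.List.pyGetD p x 0).toNat = rootp p x.toNat := by
        rw [rootp_step p x.toNat, hget, if_pos hjlt]
      have hfp : findParent (f+1) x p =
          (PySem.List.pyGetD (PySem.List.pySetD (findParent f (PySem.List.pyGetD p x 0) p).2 x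
              (findParent f (PySem.List.pyGetD p x 0) p).1) x 0,
           PySem.List.pySetD (findParent f (PySem.List.pyGetD p x 0) p).2 x
              (findParent f (PySem.List.pyGetD p x 0) p).1) := by
        simp only [findParent]
        rw [if_pos heq]
      set r := findParent f (PySem.List.pyGetD p x 0) p
      have hinr : PySem.Raise.InRange r.2.length x := by rw [hrlen]; exact hin
      have hset : PySem.List.pySetD r.2 x r.1 = r.2.set x.toNat r.1 := by
        rw [pySetD_ix r.2 x r.1 hinr, hrlen, hixx]
      have hval : r.1 = (rootp r.2 x.toNat : Int) := by
        rw [hr1, hrroots, hrootix]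
      have hcs := comp_set r.2 hrg x.toNat (by omega)
      have hgood2 : Good (r.2.set x.toNat r.1) := by rw [hval]; exact hcs.1
      have hroots2 : ∀ k, rootp (r.2.set x.toNat r.1) k = rootp p k := by
        intro k; rw [hval, hcs.2 k, hrroots]
      have hget2 : PySem.List.pyGetD (r.2.set x.toNat r.1) x 0 = r.1 := by
        rw [pyGetD_ix _ x (by rw [List.length_set]; exact hinr)]
        rw [List.length_set, hrlen, hixx]
        exact getD_set_self r.2 x.toNat r.1 (by omega)
      rw [hfp, hset]
      refine ⟨?_, by rw [List.length_set]; exact hrlen, hgood2, hroots2⟩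
      rw [hget2, hr1, hrootix]

lemma find_top (p : List Int) (x : Int) (hg : Good p)
    (h : PySem.Raise.InRange p.length x) :
    (findParent p.length x p).1 = (rootp p (ix p.length x) : Int) ∧
    (findParent p.length x p).2.length = p.length ∧ Good (findParent p.length x p).2 ∧
    ∀ k, rootp (findParent p.length x p).2 k = rootp p k := by
  by_cases hx0 : 0 ≤ x
  · rw [show ix p.length x = x.toNat from if_pos hx0]
    exact find_spec p.length p x hg hx0 h.2 (by have := h.2; omega)
  · -- negative index: parent[x] is nonnegative, so the branch always recurses
    have hL1 : 1 ≤ p.length := by obtain ⟨h1, h2⟩ := h; omega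
    have hi : ix p.length x = p.length - (-x).toNat := if_neg hx0
    have hixlt : ix p.length x < p.length := ix_lt p.length x h
    have hget : PySem.List.pyGetD p x 0 = p.getD (ix p.length x) 0 := pyGetD_ix p x h
    obtain ⟨h0, hle⟩ := hg (ix p.length x) hixlt
    have hne : PySem.List.pyGetD p x 0 ≠ x := by rw [hget]; omega
    obtain ⟨L, hLdef⟩ : ∃ L, p.length = L + 1 := ⟨p.length - 1, by omega⟩
    have hjle : (p.getD (ix p.length x) 0).toNat ≤ L := by omega
    obtain ⟨hr1, hrlen, hrg, hrroots⟩ :=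
      find_spec L p (PySem.List.pyGetD p x 0) hg (by rw [hget]; exact h0)
        (by rw [hget]; omega) (by rw [hget]; omega)
    have hrootix : rootp p (PySem.List.pyGetD p x 0).toNat = rootp p (ix p.length x) := by
      rw [hget]
      rcases Nat.lt_or_ge (p.getD (ix p.length x) 0).toNat (ix p.length x) with hlt | hge
      · rw [rootp_step p (ix p.length x), if_pos hlt]
      · have : (p.getD (ix p.length x) 0).toNat = ix p.length x := by omega
        rw [this]
    have hfp : findParent p.length x p =
        (PySem.List.pyGetD (PySem.List.pySetD (findParent L (PySem.List.pyGetD p x 0) p).2 x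
            (findParent L (PySem.List.pyGetD p x 0) p).1) x 0,
         PySem.List.pySetD (findParent L (PySem.List.pyGetD p x 0) p).2 x
            (findParent L (PySem.List.pyGetD p x 0) p).1) := by
      rw [hLdef]
      simp only [findParent]
      rw [if_pos hne]
    set r := findParent L (PySem.List.pyGetD p x 0) p
    have hinr : PySem.Raise.InRange r.2.length x := by rw [hrlen]; exact h
    have hset : PySem.List.pySetD r.2 x r.1 = r.2.set (ix p.length x) r.1 := by
      rw [pySetD_ix r.2 x r.1 hinr, hrlen]
    have hval : r.1 = (rootp r.2 (ix p.length x) : Int) := by rw [hr1, hrroots, hrootix]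
    have hcs := comp_set r.2 hrg (ix p.length x) (by omega)
    have hgood2 : Good (r.2.set (ix p.length x) r.1) := by rw [hval]; exact hcs.1
    have hroots2 : ∀ k, rootp (r.2.set (ix p.length x) r.1) k = rootp p k := by
      intro k; rw [hval, hcs.2 k, hrroots]
    have hget2 : PySem.List.pyGetD (r.2.set (ix p.length x) r.1) x 0 = r.1 := by
      have hlenset : (r.2.set (ix p.length x) r.1).length = p.length := by
        rw [List.length_set]; exact hrlen
      rw [pyGetD_ix _ x (by rw [hlenset]; exact h), hlenset]
      exact getD_set_self r.2 (ix p.length x) r.1 (by omega)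
    rw [hfp, hset]
    refine ⟨?_, by rw [List.length_set]; exact hrlen, hgood2, hroots2⟩
    rw [hget2, hr1, hrootix]

lemma union_spec (p : List Int) (a b : Int) (hg : Good p)
    (ha : PySem.Raise.InRange p.length a) (hb : PySem.Raise.InRange p.length b)
    (hne : rootp p (ix p.length a) ≠ rootp p (ix p.length b)) :
    (unionParent p.length a b p).length = p.length ∧ Good (unionParent p.length a b p) ∧
    ∀ k, rootp (unionParent p.length a b p) k =
      if rootp p k = max (rootp p (ix p.length a)) (rootp p (ix p.length b))
      then min (rootp p (ix p.length a)) (rootp p (ix p.length b)) else rootp p k := by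
  obtain ⟨ha1, halen, hag, haroots⟩ := find_top p a hg ha
  set ra := rootp p (ix p.length a) with hra
  set rb := rootp p (ix p.length b) with hrb
  set p1 := (findParent p.length a p).2 with hp1
  have hb1' : PySem.Raise.InRange p1.length b := by rw [halen]; exact hb
  have hfuel : p.length = p1.length := halen.symm
  obtain ⟨hb1, hblen, hbg, hbroots⟩ := find_top p1 b hag hb1'
  have hixb : ix p1.length b = ix p.length b := by rw [halen]
  have hb1v : (findParent p.length b p1).1 = (rb : Int) := by
    rw [hfuel, hb1, hixb, haroots]
  set p2 := (findParent p1.length b p1).2 with hp2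
  have hp2' : (findParent p.length b p1).2 = p2 := by rw [hfuel]
  have hlen2 : p2.length = p.length := by rw [hblen, halen]
  have h2g : Good p2 := hbg
  have h2roots : ∀ k, rootp p2 k = rootp p k := fun k => by rw [hbroots, haroots]
  have hralt : ra < p.length := lt_of_le_of_lt (rootp_le p _) (ix_lt _ _ ha)
  have hrblt : rb < p.length := lt_of_le_of_lt (rootp_le p _) (ix_lt _ _ hb)
  have hfixa : p2.getD ra 0 = (ra : Int) := by
    have : rootp p2 ra = ra := by rw [h2roots, hra, rootp_root p hg _ (ix_lt _ _ ha)]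
    have hfx := rootp_fix p2 h2g ra (by omega)
    rw [this] at hfx; exact hfx
  have hfixb : p2.getD rb 0 = (rb : Int) := by
    have : rootp p2 rb = rb := by rw [h2roots, hrb, rootp_root p hg _ (ix_lt _ _ hb)]
    have hfx := rootp_fix p2 h2g rb (by omega)
    rw [this] at hfx; exact hfx
  have hunfold : unionParent p.length a b p =
      if (findParent p.length a p).1 < (findParent p.length b p1).1
      then PySem.List.pySetD (findParent p.length b p1).2 (findParent p.length b p1).1 (findParent p.length a p).1
      else PySem.List.pySetD (findParent p.length b p1).2 (findParent p.length a p).1 (findParent p.length b p1).1 := by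
    simp only [unionParent]
    rw [← hp1]
  rw [hunfold, ha1, hb1v, hp2']
  by_cases hcmp : (ra : Int) < (rb : Int)
  · rw [if_pos hcmp]
    have hralb : ra < rb := by exact_mod_cast hcmp
    have hsetb : PySem.List.pySetD p2 (rb : Int) (ra : Int) = p2.set rb (ra : Int) := by
      rw [pySetD_ix p2 _ _ (by rw [hlen2]; exact ⟨by omega, by exact_mod_cast hrblt⟩), hlen2]
      simp [ix]
    rw [hsetb]
    obtain ⟨hug, huroots⟩ := union_set p2 h2g rb ra (by omega) hralb hfixb hfixa
    refine ⟨by rw [List.length_set]; exact hlen2, hug, ?_⟩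
    intro k
    rw [huroots k, h2roots k]
    have hmax : max ra rb = rb := by omega
    have hmin : min ra rb = ra := by omega
    rw [hmax, hmin]
  · rw [if_neg hcmp]
    have hbla : rb < ra := by
      have h1 : ra ≠ rb := hne
      omega
    have hseta : PySem.List.pySetD p2 (ra : Int) (rb : Int) = p2.set ra (rb : Int) := by
      rw [pySetD_ix p2 _ _ (by rw [hlen2]; exact ⟨by omega, by exact_mod_cast hralt⟩), hlen2]
      simp [ix]
    rw [hseta]
    obtain ⟨hug, huroots⟩ := union_set p2 h2g ra rb (by omega) hbla hfixa hfixb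
    refine ⟨by rw [List.length_set]; exact hlen2, hug, ?_⟩
    intro k
    rw [huroots k, h2roots k]
    have hmax : max ra rb = ra := by omega
    have hmin : min ra rb = rb := by omega
    rw [hmax, hmin]

lemma getD_map_lt (c : List Int) (f : Int → Int) (k : Nat) (hk : k < c.length) :
    (c.map f).getD k 0 = f (c.getD k 0) := by
  simp [List.getD_eq_getElem?_getD, List.getElem?_map, List.getElem?_eq_getElem hk]

lemma step_rel (st st' : Int × Int × List Int) (e : Int × Int × Int)
    (hr : RelAB st st')
    (ha : PySem.Raise.InRange st.2.2.length e.2.1)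
    (hb : PySem.Raise.InRange st.2.2.length e.2.2) :
    RelAB (stepA st e) (stepB st' e) ∧ (stepA st e).2.2.length = st.2.2.length := by
  obtain ⟨h1, h2, hlen, hgood, hinv⟩ := hr
  obtain ⟨hfa1, hfalen, hfag, hfaroots⟩ := find_top st.2.2 e.2.1 hgood ha
  have hinb : PySem.Raise.InRange (findParent st.2.2.length e.2.1 st.2.2).2.length e.2.2 := by
    rw [hfalen]; exact hb
  obtain ⟨hfb1, hfblen, hfbg, hfbroots⟩ :=
    find_top (findParent st.2.2.length e.2.1 st.2.2).2 e.2.2 hfag hinb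
  -- abbreviations
  set p := st.2.2 with hp
  set c := st'.2.2 with hc
  set fa := findParent p.length e.2.1 p with hfa
  set p2 := (findParent fa.2.length e.2.2 fa.2).2 with hp2
  have hfb1' : (findParent fa.2.length e.2.2 fa.2).1 = (rootp p (ix p.length e.2.2) : Int) := by
    rw [hfb1, hfalen, hfaroots]
  have hlen2 : p2.length = p.length := by rw [hp2, hfblen, hfalen]
  have h2roots : ∀ k, rootp p2 k = rootp p k := fun k => by rw [hp2, hfbroots, hfaroots]
  set ra := rootp p (ix p.length e.2.1) with hra
  set rb := rootp p (ix p.length e.2.2) with hrb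
  -- B's lookups
  have hcalen : PySem.Raise.InRange c.length e.2.1 := by rw [← hlen]; exact ha
  have hcblen : PySem.Raise.InRange c.length e.2.2 := by rw [← hlen]; exact hb
  have hca : PySem.List.pyGetD c e.2.1 0 = (ra : Int) := by
    rw [pyGetD_ix c _ hcalen, hinv _ (by rw [hlen]; exact ix_lt _ _ hcalen)]
    rw [← hlen]
  have hcb : PySem.List.pyGetD c e.2.2 0 = (rb : Int) := by
    rw [pyGetD_ix c _ hcblen, hinv _ (by rw [hlen]; exact ix_lt _ _ hcblen)]
    rw [← hlen]
  by_cases hrr : ra = rb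
  · -- roots equal: neither side changes
    have hA : stepA st e = (st.1, st.2.1, p2) := by
      simp only [stepA]
      rw [if_neg]
      simp only [ne_eq, not_not]
      rw [hfa1, hfb1', hrr]
    have hB : stepB st' e = st' := by
      simp only [stepB]
      rw [if_neg]
      simp only [ne_eq, not_not]
      rw [hca, hcb, hrr]
    rw [hA, hB]
    refine ⟨⟨h1, h2, by simpa [hlen2] using hlen, hfbg, ?_⟩, by simpa using hlen2⟩
    intro k hk
    rw [hinv k (by rw [← hlen2]; exact hk), h2roots]
  · -- roots differ: A unions, B relabels
    have hA : stepA st e = (st.1 + e.1, e.1, unionParent p2.length e.2.1 e.2.2 p2) := by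
      simp only [stepA]
      rw [if_pos]
      rw [hfa1, hfb1']
      exact fun hh => hrr (by exact_mod_cast hh)
    have hB : stepB st' e = (st'.1 + e.1, e.1,
        c.map (fun x => if x = (if (ra:Int) < (rb:Int) then (rb:Int) else (ra:Int))
          then (if (ra:Int) < (rb:Int) then (ra:Int) else (rb:Int)) else x)) := by
      simp only [stepB]
      rw [hca, hcb, if_pos]
      exact fun hh => hrr (by exact_mod_cast hh)
    have hinap2 : PySem.Raise.InRange p2.length e.2.1 := by rw [hlen2]; exact ha
    have hinbp2 : PySem.Raise.InRange p2.length e.2.2 := by rw [hlen2]; exact hb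
    have hixa2 : ix p2.length e.2.1 = ix p.length e.2.1 := by rw [hlen2]
    have hixb2 : ix p2.length e.2.2 = ix p.length e.2.2 := by rw [hlen2]
    have hne2 : rootp p2 (ix p2.length e.2.1) ≠ rootp p2 (ix p2.length e.2.2) := by
      rw [hixa2, hixb2, h2roots, h2roots, ← hra, ← hrb]; exact hrr
    obtain ⟨hulen, hug, huroots⟩ := union_spec p2 e.2.1 e.2.2 hfbg hinap2 hinbp2 hne2
    have hulen' : (unionParent p2.length e.2.1 e.2.2 p2).length = p.length := by
      rw [hulen, hlen2]
    have huroots' : ∀ k, rootp (unionParent p2.length e.2.1 e.2.2 p2) k =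
        if rootp p k = max ra rb then min ra rb else rootp p k := by
      intro k
      rw [huroots k, hixa2, hixb2, h2roots, h2roots, h2roots, ← hra, ← hrb]
    rw [hA, hB]
    refine ⟨⟨by simpa using h1 ▸ rfl, rfl, ?_, hug, ?_⟩, by simpa using hulen'⟩
    · simpa [hulen', List.length_map] using hlen
    · intro k hk
      have hk' : k < c.length := by rw [← hlen, ← hulen']; exact hk
      have hkp : k < p.length := by rw [hlen]; exact hk'
      rw [getD_map_lt c _ k hk', hinv k hkp, huroots' k]
      have hmaxI : ((max ra rb : Nat) : Int) = if (ra:Int) < (rb:Int) then (rb:Int) else (ra:Int) := by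
        split <;> rename_i hh <;> push_cast <;> omega
      have hminI : ((min ra rb : Nat) : Int) = if (ra:Int) < (rb:Int) then (ra:Int) else (rb:Int) := by
        split <;> rename_i hh <;> push_cast <;> omega
      by_cases hmax : rootp p k = max ra rb
      · rw [if_pos hmax, hmax, hmaxI, if_pos rfl, hminI]
      · rw [if_neg hmax, if_neg]
        intro hcontra
        apply hmax
        rw [← hmaxI] at hcontra
        exact_mod_cast hcontra

lemma fold_rel (edges : List (Int × Int × Int)) : ∀ (st st' : Int × Int × List Int),
    RelAB st st' →
    (∀ e ∈ edges, PySem.Raise.InRange st.2.2.length e.2.1 ∧ PySem.Raise.InRange st.2.2.length e.2.2) →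
    RelAB (edges.foldl stepA st) (edges.foldl stepB st') := by
  induction edges with
  | nil => intro st st' hr _; exact hr
  | cons e t IH =>
    intro st st' hr hin
    obtain ⟨hrel, hlenpres⟩ := step_rel st st' e hr (hin e (by simp)).1 (hin e (by simp)).2
    simp only [List.foldl_cons]
    exact IH _ _ hrel (fun e' he' => by rw [hlenpres]; exact hin e' (by simp [he']))

-- ===== VERDICT (by name: the statement is the Claim_ definition above) =====
theorem solution_spec : Claim_equal_solution := by
  unfold Claim_equal_solution Spec_solution
  intro n graph _ hpre
  cases graph with
  | nil => rfl
  | cons g gs =>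
    have hg0 := hpre g (by simp)
    have hn0 : 0 ≤ n := by omega
    -- the shared initial list and its basic facts
    have hlen0 : (PySem.List.pyRange 0 (n+1) 1).length = (n+1).toNat := by
      rw [PySem.List.length_pyRange_one]
      norm_num
    have hget0 : ∀ i, i < (PySem.List.pyRange 0 (n+1) 1).length →
        (PySem.List.pyRange 0 (n+1) 1).getD i 0 = (i : Int) := by
      intro i hi
      rw [List.getD_eq_getElem?_getD, List.getElem?_eq_getElem hi,
        PySem.List.getElem_pyRange_one]
      simp
    have hgood0 : Good (PySem.List.pyRange 0 (n+1) 1) := by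
      intro i hi
      rw [hget0 i hi]
      simp
    have hroot0 : ∀ k, k < (PySem.List.pyRange 0 (n+1) 1).length →
        rootp (PySem.List.pyRange 0 (n+1) 1) k = k := by
      intro k hk
      rw [rootp_step, hget0 k hk]
      simp
    have hrel0 : RelAB (0, 0, PySem.List.pyRange 0 (n+1) 1)
        (0, 0, PySem.List.pyRange 0 (n+1) 1) := by
      refine ⟨rfl, rfl, rfl, hgood0, ?_⟩
      intro k hk
      rw [hget0 k hk, hroot0 k hk]
    -- both ports fold the same sorted edge list
    have hedges : (g :: gs).foldl (fun acc e => acc ++ [(e.2.2, e.1, e.2.1)]) [] =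
        (g :: gs).map (fun e => (e.2.2, e.1, e.2.1)) := by
      simpa using PySem.List.foldl_append_singleton_eq_map
        (fun e => (e.2.2, e.1, e.2.1)) (g :: gs) []
    have hmem : ∀ e ∈ lexSort ((g :: gs).map (fun e => (e.2.2, e.1, e.2.1))),
        PySem.Raise.InRange (PySem.List.pyRange 0 (n+1) 1).length e.2.1 ∧
        PySem.Raise.InRange (PySem.List.pyRange 0 (n+1) 1).length e.2.2 := by
      intro e he
      have hmm : e ∈ (g :: gs).map (fun e => (e.2.2, e.1, e.2.1)) := by
        unfold lexSort at he
        rw [PySem.List.mem_sorted, PySem.List.mem_sorted, PySem.List.mem_sorted] at he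
        exact he
      obtain ⟨g', hg', rfl⟩ := List.mem_map.1 hmm
      obtain ⟨⟨ha1, ha2⟩, hb1, hb2⟩ := hpre g' hg'
      have hcast : ((n+1).toNat : Int) = n + 1 := by omega
      constructor <;> · simp only [PySem.Raise.InRange, hlen0, hcast]; omega
    have hfold := fold_rel (lexSort ((g :: gs).map (fun e => (e.2.2, e.1, e.2.1))))
      (0, 0, PySem.List.pyRange 0 (n+1) 1) (0, 0, PySem.List.pyRange 0 (n+1) 1) hrel0 hmem
    obtain ⟨he1, he2, -⟩ := hfold
    simp only [solution, solution_alt]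
    rw [hedges, he1, he2]
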